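-- pv_equiv track=rewrite | github.com/davewalker5/NetworkCalculator | src/ipv4/ipv4_subnet.py | calculate_for_hosts
-- ===== SOURCE A (Python) =====
-- def calculate_for_hosts(network_bits, number_of_hosts):
--     """
--     Given a number of hosts, calculate the number of network bits and the number of subnet bits
--     required to accommodate that many hosts per subnet
--
--     :param network_bits: Current number of network bits
--     :param number_of_hosts: Number of hosts per subnet
--     :return: Tuple of the number of network bits and subnet bits
--     """
--     number_of_subnet_bits = 0
--     new_network_bits = 0
--
--     for n in range(1, 33):
--         number_of_hosts_for_n = pow(2, n) - 2
--         if number_of_hosts_for_n >= number_of_hosts: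
--             new_network_bits = 32 - n
--             number_of_subnet_bits = new_network_bits - network_bits
--             break
--
--     return new_network_bits, number_of_subnet_bits
-- ===== SOURCE B (Python) =====
-- def calculate_for_hosts(network_bits, number_of_hosts):
--     """Closed-form: n = bit width of (hosts + 1), clamped to >= 1; no loop."""
--     if number_of_hosts <= 0:
--         n = 1
--     else:
--         n = (number_of_hosts + 1).bit_length()
--     if n > 32:
--         return 0, 0
--     return 32 - n, (32 - n) - network_bits
-- ===== Notes on version B (the rewrite author's own statement) =====
-- stated objective: simpler
-- what changed: Replaces the 1..32 linear scan for the smallest n with 2^n - 2 >= hosts by a direct bit_length computation (n = (hosts+1).bit_length(), clamped to 1), keeping the loop's no-break default when n would exceed 32.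
import Mathlib
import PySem

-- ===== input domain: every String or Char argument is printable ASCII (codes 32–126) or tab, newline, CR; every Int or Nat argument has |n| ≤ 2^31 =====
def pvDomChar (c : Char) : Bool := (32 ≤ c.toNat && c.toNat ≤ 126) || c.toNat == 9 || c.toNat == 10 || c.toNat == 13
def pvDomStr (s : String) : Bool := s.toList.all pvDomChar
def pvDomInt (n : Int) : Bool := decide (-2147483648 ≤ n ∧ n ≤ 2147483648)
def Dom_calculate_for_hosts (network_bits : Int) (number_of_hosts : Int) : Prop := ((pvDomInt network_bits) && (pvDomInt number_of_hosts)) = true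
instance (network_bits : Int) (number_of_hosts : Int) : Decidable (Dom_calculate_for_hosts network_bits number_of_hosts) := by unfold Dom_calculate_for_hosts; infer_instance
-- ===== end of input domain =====

-- B replaces A's 1..32 scan by a closed-form bit-length computation (objective: simpler).

-- ===== PORT A =====
-- the `for n in range(1, 33)` loop with its break; state = the remaining range,
-- the defaults are returned if the loop exhausts without a break
def chLoopA (network_bits : Int) (number_of_hosts : Int) : List Int → Int × Int
  | [] => (0, 0)
  | n :: rest =>
      if (2 : Int) ^ n.toNat - 2 ≥ number_of_hosts then
        (32 - n, (32 - n) - network_bits)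
      else
        chLoopA network_bits number_of_hosts rest

def calculate_for_hosts (network_bits : Int) (number_of_hosts : Int) : Int × Int :=
  chLoopA network_bits number_of_hosts (PySem.List.pyRange 1 33 1)

-- ===== PORT B =====
-- (m+1).bit_length() for m ≥ 1 is Nat.size of the corresponding Nat
def calculate_for_hosts_alt (network_bits : Int) (number_of_hosts : Int) : Int × Int :=
  let n : Int :=
    if number_of_hosts ≤ 0 then 1
    else (Nat.size (number_of_hosts + 1).toNat : Int)
  if n > 32 then (0, 0)
  else (32 - n, (32 - n) - network_bits)

-- ===== PRECONDITION & SPEC =====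
def Spec_calculate_for_hosts (network_bits : Int) (number_of_hosts : Int) (out : Int × Int) : Prop := out = calculate_for_hosts_alt network_bits number_of_hosts
instance (network_bits : Int) (number_of_hosts : Int) (out : Int × Int) : Decidable (Spec_calculate_for_hosts network_bits number_of_hosts out) := by unfold Spec_calculate_for_hosts; infer_instance

-- ===== CLAIM (what is proved, stated in full; the proofs are below) =====
def Claim_equal_calculate_for_hosts : Prop := ∀ (network_bits : Int) (number_of_hosts : Int), Dom_calculate_for_hosts network_bits number_of_hosts → Spec_calculate_for_hosts network_bits number_of_hosts (calculate_for_hosts network_bits number_of_hosts)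

-- ===== LEMMAS AND PROOFS =====

-- If N (with 1 ≤ N ≤ 32) is the first exponent satisfying the loop's condition,
-- the loop started at any a with 1 ≤ a ≤ N returns (32 - N, 32 - N - nb).
lemma chLoopA_finds (nb h N : Int) (hN1 : 1 ≤ N) (hN32 : N ≤ 32)
    (hfound : (2 : Int) ^ N.toNat - 2 ≥ h)
    (hmin : ∀ m : Int, 1 ≤ m → m < N → ¬ ((2 : Int) ^ m.toNat - 2 ≥ h)) :
    ∀ k : Nat, ∀ a : Int, (N - a).toNat = k → 1 ≤ a → a ≤ N →
      chLoopA nb h (PySem.List.pyRange a 33 1) = (32 - N, (32 - N) - nb) := by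
  intro k
  induction k with
  | zero =>
      intro a hk ha1 haN
      have haN' : a = N := by omega
      subst haN'
      rw [PySem.List.pyRange_one_cons (by omega : a < 33)]
      simp only [chLoopA, if_pos hfound]
  | succ k ih =>
      intro a hk ha1 haN
      have haltN : a < N := by omega
      rw [PySem.List.pyRange_one_cons (by omega : a < 33)]
      simp only [chLoopA, if_neg (hmin a ha1 haltN)]
      exact ih (a + 1) (by omega) (by omega) (by omega)

-- ===== VERDICT (by name: the statement is the Claim_ definition above) =====
theorem calculate_for_hosts_spec : Claim_equal_calculate_for_hosts := by
  intro nb h hDom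
  have hbound : h ≤ 2147483648 := by
    simp only [Dom_calculate_for_hosts, pvDomInt, Bool.and_eq_true, decide_eq_true_eq] at hDom
    omega
  unfold Spec_calculate_for_hosts calculate_for_hosts calculate_for_hosts_alt
  by_cases hpos : h ≤ 0
  · -- n = 1
    rw [if_pos hpos]
    have := chLoopA_finds nb h 1 le_rfl (by omega)
      (by norm_num; omega)
      (by intro m h1 h2; omega)
      0 1 (by omega) le_rfl le_rfl
    simp only [this]
    norm_num
  · -- n = size (h+1)
    rw [if_neg hpos]
    rw [not_le] at hpos
    set m : Nat := (h + 1).toNat with hm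
    have hm2 : 2 ≤ m := by omega
    have hmcast : (m : Int) = h + 1 := by omega
    have hsz1 : 1 ≤ Nat.size m := Nat.size_pos.mpr (by omega)
    have hlow : 2 ^ (Nat.size m - 1) ≤ m := by
      have : Nat.size m - 1 < Nat.size m := by omega
      exact (Nat.lt_size).mp this
    have hhigh : m < 2 ^ Nat.size m := Nat.lt_size_self m
    have hsz32 : Nat.size m ≤ 32 := by
      rw [Nat.size_le]
      omega
    set N : Int := (Nat.size m : Int) with hN
    have hfound : (2 : Int) ^ N.toNat - 2 ≥ h := by
      have hNt : N.toNat = Nat.size m := by omega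
      rw [hNt]
      have : ((m : Int)) < (2 : Int) ^ Nat.size m := by exact_mod_cast hhigh
      omega
    have hmin : ∀ x : Int, 1 ≤ x → x < N → ¬ ((2 : Int) ^ x.toNat - 2 ≥ h) := by
      intro x hx1 hxN
      have hxle : x.toNat ≤ Nat.size m - 1 := by omega
      have h1 : (2 : Nat) ^ x.toNat ≤ 2 ^ (Nat.size m - 1) :=
        Nat.pow_le_pow_right (by norm_num) hxle
      have h2 : (2 : Nat) ^ x.toNat ≤ m := le_trans h1 hlow
      have h3 : ((2 : Int)) ^ x.toNat ≤ (m : Int) := by exact_mod_cast h2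
      omega
    have hrun := chLoopA_finds nb h N (by omega) (by omega) hfound hmin
      (N - 1).toNat 1 (by omega) le_rfl (by omega)
    rw [hrun, if_neg (by omega : ¬ N > 32)]
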